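-- pv_equiv track=rewrite | github.com/NikolayBayzakov/PL-bayzakov | practical work/9.2.py | sort_k
-- ===== SOURCE A (Python) =====
-- def sort_k(matrix, k):
--     k_row = matrix[k - 1]
--
--     sorted_index = sorted(range(len(k_row)), key=lambda i: k_row[i])
--
--     sorted_matrix = []
--     for row in matrix:
--         sorted_row = [row[i] for i in sorted_index]
--         sorted_matrix.append(sorted_row)
--
--     return sorted_matrix
-- ===== SOURCE B (Python) =====
-- def sort_k(matrix, k):
--     n = len(matrix[k - 1])
--     cols = [[row[i] for row in matrix] for i in range(n)]
--     cols = sorted(cols, key=lambda col: col[k - 1])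
--     return [[col[j] for col in cols] for j in range(len(matrix))]
-- ===== Notes on version B (the rewrite author's own statement) =====
-- stated objective: alternative
-- what changed: B transposes the matrix into column lists, sorts the columns themselves stably by their (k-1)-th entry, and transposes back, instead of computing an index permutation of the k-th row and applying it to every row.
import Mathlib
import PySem

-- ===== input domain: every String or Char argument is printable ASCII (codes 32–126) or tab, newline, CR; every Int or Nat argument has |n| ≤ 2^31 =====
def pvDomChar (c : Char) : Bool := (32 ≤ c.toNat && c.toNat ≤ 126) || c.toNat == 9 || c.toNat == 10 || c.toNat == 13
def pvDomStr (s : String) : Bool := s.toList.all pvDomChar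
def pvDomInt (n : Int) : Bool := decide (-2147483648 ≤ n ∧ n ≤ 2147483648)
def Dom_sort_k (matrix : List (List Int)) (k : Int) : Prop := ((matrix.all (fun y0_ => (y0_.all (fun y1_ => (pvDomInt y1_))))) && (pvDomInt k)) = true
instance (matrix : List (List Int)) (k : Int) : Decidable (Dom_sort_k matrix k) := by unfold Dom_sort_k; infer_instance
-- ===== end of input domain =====

-- B reorganises the work around column objects: it transposes the matrix into columns,
-- sorts the columns stably by their (k-1)-th entry, and transposes back (objective: alternative).


-- ===== PORT A =====
-- indexing is via pyGetD with a default; Pre_sort_k guarantees every index is in range,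
-- so the default is never the result (Python raises IndexError exactly outside Pre_).
def sort_k (matrix : List (List Int)) (k : Int) : List (List Int) :=
  let k_row := PySem.List.pyGetD matrix (k - 1) []
  let sorted_index := PySem.List.sorted (PySem.List.pyRange 0 (k_row.length : Int) 1)
      (fun i => PySem.List.pyGetD k_row i 0) false
  matrix.foldl (fun acc row => acc ++ [sorted_index.map (fun i => PySem.List.pyGetD row i 0)]) []

-- ===== PORT B =====
def sort_k_alt (matrix : List (List Int)) (k : Int) : List (List Int) :=
  let n := (PySem.List.pyGetD matrix (k - 1) []).length
  let cols := (PySem.List.pyRange 0 (n : Int) 1).map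
      (fun i => matrix.map (fun row => PySem.List.pyGetD row i 0))
  let cols' := PySem.List.sorted cols (fun col => PySem.List.pyGetD col (k - 1) 0) false
  (PySem.List.pyRange 0 (matrix.length : Int) 1).map
      (fun j => cols'.map (fun col => PySem.List.pyGetD col j 0))

-- ===== PRECONDITION & SPEC =====
-- exactly where Python A returns: k-1 is a valid (possibly negative) index into matrix,
-- and every row is at least as long as the chosen k-th row (else row[i] raises IndexError)
def Pre_sort_k (matrix : List (List Int)) (k : Int) : Prop :=
  PySem.Raise.InRange matrix.length (k - 1) ∧
  ∀ row ∈ matrix, (PySem.List.pyGetD matrix (k - 1) []).length ≤ row.length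
instance (matrix : List (List Int)) (k : Int) : Decidable (Pre_sort_k matrix k) := by
  unfold Pre_sort_k PySem.Raise.InRange; infer_instance
def pvWitness_sort_k : List (List Int) × Int := ([[3, 1, 2], [4, 5, 6]], 1)
def Spec_sort_k (matrix : List (List Int)) (k : Int) (out : List (List Int)) : Prop := out = sort_k_alt matrix k
instance (matrix : List (List Int)) (k : Int) (out : List (List Int)) : Decidable (Spec_sort_k matrix k out) := by unfold Spec_sort_k; infer_instance

-- ===== CLAIM (what is proved, stated in full; the proofs are below) =====
def Claim_equal_sort_k : Prop := ∀ (matrix : List (List Int)) (k : Int), Dom_sort_k matrix k → Pre_sort_k matrix k → Spec_sort_k matrix k (sort_k matrix k)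

-- ===== LEMMAS AND PROOFS =====

-- pyGet? commutes with map
theorem pyGet?_map' {α β : Type} (f : α → β) (xs : List α) (i : Int) :
    PySem.List.pyGet? (xs.map f) i = (PySem.List.pyGet? xs i).map f := by
  simp [PySem.List.pyGet?]

-- pyGetD commutes with map when the index is in range (any defaults)
theorem pyGetD_map_inRange {α β : Type} (f : α → β) (xs : List α) (i : Int) (d : β) (d' : α)
    (h : PySem.Raise.InRange xs.length i) :
    PySem.List.pyGetD (xs.map f) i d = f (PySem.List.pyGetD xs i d') := by
  have hs : PySem.List.pyGet? xs i ≠ none := by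
    intro hc
    rw [PySem.List.pyGet?_eq_none_iff] at hc
    exact hc h
  obtain ⟨v, hv⟩ := Option.ne_none_iff_exists'.mp hs
  simp [PySem.List.pyGetD, pyGet?_map', hv]

-- insertion into a mapped list
theorem insertBy_map {α β κ : Type} [LT κ] [DecidableLT κ] (g : α → β) (key : β → κ)
    (x : α) (acc : List α) :
    PySem.List.insertBy (fun a b => decide (key a < key b)) (g x) (acc.map g)
      = (PySem.List.insertBy (fun a b => decide (key (g a) < key (g b))) x acc).map g := by
  induction acc with
  | nil => simp [PySem.List.insertBy]
  | cons y ys ih =>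
    simp only [List.map_cons, PySem.List.insertBy]
    by_cases h : key (g x) < key (g y)
    · simp [h]
    · simp [h, ih]

-- stable sort commutes with map: sorted(map g xs, key) = map g (sorted xs (key ∘ g))
theorem sorted_map_comm {α β κ : Type} [LT κ] [DecidableLT κ] (g : α → β) (key : β → κ)
    (xs : List α) :
    PySem.List.sorted (xs.map g) key false
      = (PySem.List.sorted xs (fun a => key (g a)) false).map g := by
  rw [PySem.List.sorted_eq_foldl_insertBy, PySem.List.sorted_eq_foldl_insertBy]
  suffices h : ∀ acc : List α,
      List.foldl (fun acc x => PySem.List.insertBy (fun a b => decide (key a < key b)) x acc)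
        (acc.map g) (xs.map g)
      = (List.foldl (fun acc x => PySem.List.insertBy (fun a b => decide (key (g a) < key (g b))) x acc)
          acc xs).map g by
    simpa using h []
  induction xs with
  | nil => intro acc; simp
  | cons x xs ih =>
    intro acc
    simp only [List.map_cons, List.foldl_cons, insertBy_map]
    exact ih _

theorem sort_k_eq_map (matrix : List (List Int)) (k : Int) :
    sort_k matrix k =
      matrix.map (fun row =>
        (PySem.List.sorted (PySem.List.pyRange 0 ((PySem.List.pyGetD matrix (k - 1) []).length : Int) 1)
          (fun i => PySem.List.pyGetD (PySem.List.pyGetD matrix (k - 1) []) i 0) false).map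
          (fun i => PySem.List.pyGetD row i 0)) := by
  simp only [sort_k]
  rw [PySem.List.foldl_append_singleton_eq_map]
  simp

-- ===== VERDICT (by name: the statement is the Claim_ definition above) =====
theorem sort_k_spec : Claim_equal_sort_k := by
  intro matrix k _ hpre
  obtain ⟨hk, _⟩ := hpre
  unfold Spec_sort_k
  rw [sort_k_eq_map]
  simp only [sort_k_alt]
  set krow := PySem.List.pyGetD matrix (k - 1) [] with hkrow
  set key : Int → Int := fun i => PySem.List.pyGetD krow i 0 with hkey
  -- sort the mapped columns = map the sorted indices
  rw [sorted_map_comm]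
  have hkeyeq : (fun i : Int => PySem.List.pyGetD (matrix.map (fun row => PySem.List.pyGetD row i 0)) (k - 1) 0)
      = key := by
    funext i
    rw [pyGetD_map_inRange (fun row => PySem.List.pyGetD row i 0) matrix (k - 1) 0 [] hk]
  rw [hkeyeq]
  set idx := PySem.List.sorted (PySem.List.pyRange 0 (krow.length : Int) 1) key false with hidx
  -- compare row by row
  apply List.ext_getElem
  · simp [PySem.List.length_pyRange_one]
  · intro j h1 h2
    have hjlen : j < matrix.length := by simpa using h1
    simp only [List.getElem_map, List.map_map]
    have hjr : j < (PySem.List.pyRange 0 (matrix.length : Int) 1).length := by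
      simp [PySem.List.length_pyRange_one]; omega
    have hj : (PySem.List.pyRange 0 (matrix.length : Int) 1)[j] = (j : Int) := by
      rw [PySem.List.getElem_pyRange_one]; ring
    rw [hj]
    apply List.map_congr_left
    intro i _
    simp only [Function.comp_apply]
    rw [pyGetD_map_inRange (fun row => PySem.List.pyGetD row i 0) matrix (j : Int) 0 []
        (by constructor <;> omega)]
    congr 1
    rw [PySem.List.pyGetD_eq_getElem matrix [] (by omega) (by exact_mod_cast hjlen)]
    simp
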